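-- pv_equiv track=rewrite | github.com/Dono-Rossi/CSC221 | base64conversion/Frombase64.py | text_to_base64
-- ===== SOURCE A (Python) =====
-- base64_chars = "ABCDEFGHIJKLMNOPQRSTUVWXYZabcdefghijklmnopqrstuvwxyz0123456789+/"
--
-- def text_to_base64(text):
--     text_bytes = text.encode('utf-8')
--
--     base64_output = ""
--     index = 0
--     while index < len(text_bytes):
--         chunk = text_bytes[index:index + 3]
--
--         padding = 3 - len(chunk)
--         if padding:
--             chunk += bytes([0] * padding)
--
--         value = (chunk[0] << 16) + (chunk[1] << 8) + chunk[2]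
--
--         for i in range(4):
--             base64_output += base64_chars[(value >> (18 - 6 * i)) & 63]
--
--         if padding:
--             base64_output = base64_output[:-padding] + '=' * padding
--
--         index += 3
--
--     if base64_output.endswith('='):
--         base64_output = base64_output[:-1]
--
--     return base64_output
-- ===== SOURCE B (Python) =====
-- base64_chars = "ABCDEFGHIJKLMNOPQRSTUVWXYZabcdefghijklmnopqrstuvwxyz0123456789+/"
--
-- def text_to_base64(text):
--     # streaming bit-accumulator encoder: feed bytes into an accumulator and
--     # emit one base64 digit whenever 6 bits are available; no 3-byte chunking.
--     out = []
--     acc = 0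
--     bits = 0
--     for byte in text.encode('utf-8'):
--         acc = acc * 256 + byte
--         bits += 8
--         while bits >= 6:
--             bits -= 6
--             digit, acc = divmod(acc, 1 << bits)
--             out.append(base64_chars[digit])
--     if bits:
--         out.append(base64_chars[acc * (1 << (6 - bits))])
--         out.append('=' * ((6 - bits) // 2))
--     s = ''.join(out)
--     return s[:-1] if s.endswith('=') else s
-- ===== Notes on version B (the rewrite author's own statement) =====
-- stated objective: alternative
-- what changed: B replaces A's explicit 3-byte chunking with zero-padding, 24-bit value assembly and per-chunk output-string padding surgery by a streaming bit-accumulator encoder that emits one base64 digit whenever 6 bits are buffered and flushes leftover bits at the end.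
import Mathlib
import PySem

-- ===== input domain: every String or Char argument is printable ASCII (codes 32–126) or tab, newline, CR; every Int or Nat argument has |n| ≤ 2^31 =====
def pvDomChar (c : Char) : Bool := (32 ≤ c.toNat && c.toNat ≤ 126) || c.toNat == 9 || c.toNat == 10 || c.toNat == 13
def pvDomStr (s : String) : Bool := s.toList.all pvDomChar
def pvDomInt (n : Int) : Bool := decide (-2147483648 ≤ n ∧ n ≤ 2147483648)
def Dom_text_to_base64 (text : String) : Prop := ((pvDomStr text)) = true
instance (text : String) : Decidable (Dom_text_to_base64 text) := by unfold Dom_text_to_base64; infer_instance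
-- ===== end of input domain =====

-- B re-implements A as a streaming bit-accumulator encoder (emit a digit per 6 buffered
-- bits) instead of A's explicit 3-byte chunking with per-chunk padding surgery; same
-- return value on all inputs (objective: alternative).

def b64chars : List Char := "ABCDEFGHIJKLMNOPQRSTUVWXYZabcdefghijklmnopqrstuvwxyz0123456789+/".toList

-- ===== PORT A =====
-- On Dom (ASCII) text.encode('utf-8') is the list of character codes; indices into
-- base64_chars are always < 64, so getD is exact for Python's base64_chars[i].
-- the inner 'for i in range(4)' loop of A
def aEmit4 (value : Nat) (acc : List Char) : List Char :=
  (List.range 4).foldl (fun a i => a ++ [b64chars.getD ((value >>> (18 - 6 * i)) &&& 63) 'A']) acc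

def aLoop (bs : List Nat) (acc : List Char) : List Char :=
  match bs with
  | [] => acc
  | b0 :: rest =>
    let chunk := (b0 :: rest).take 3                              -- text_bytes[index:index+3]
    let padding := 3 - chunk.length
    let chunk := chunk ++ List.replicate padding 0      -- chunk += bytes([0]*padding)
    let value := (chunk.getD 0 0) <<< 16 + (chunk.getD 1 0) <<< 8 + chunk.getD 2 0
    let acc := aEmit4 value acc
    -- base64_output = base64_output[:-padding] + '=' * padding
    let acc := if padding ≠ 0 then acc.take (acc.length - padding) ++ List.replicate padding '=' else acc
    aLoop ((b0 :: rest).drop 3) acc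
termination_by bs.length
decreasing_by simp [List.length_drop]

def text_to_base64 (text : String) : String :=
  let out := aLoop (text.toList.map Char.toNat) []
  if PySem.Str.endswith (String.ofList out) "=" then
    String.ofList (out.take (out.length - 1))               -- base64_output[:-1]
  else String.ofList out

-- ===== PORT B =====
-- the 'while bits >= 6' drain loop
def bDrain (acc bits : Nat) : List Char × Nat × Nat :=
  if 6 ≤ bits then
    let bits' := bits - 6
    let digit := acc / (1 <<< bits')                    -- digit, acc = divmod(acc, 1 << bits)
    let acc' := acc % (1 <<< bits')
    let r := bDrain acc' bits'
    (b64chars.getD digit 'A' :: r.1, r.2)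
  else ([], acc, bits)
termination_by bits
decreasing_by omega

-- the 'for byte in …' loop plus the final flush of leftover bits
def bLoop (bs : List Nat) (acc bits : Nat) : List Char :=
  match bs with
  | [] =>
      if bits ≠ 0 then
        b64chars.getD (acc * (1 <<< (6 - bits))) 'A' :: List.replicate ((6 - bits) / 2) '='
      else []
  | byte :: rest =>
      let r := bDrain (acc * 256 + byte) (bits + 8)
      r.1 ++ bLoop rest r.2.1 r.2.2

def text_to_base64_alt (text : String) : String :=
  let s := String.ofList (bLoop (text.toList.map Char.toNat) 0 0)
  if PySem.Str.endswith s "=" then String.ofList (s.toList.take (s.toList.length - 1)) else s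

-- ===== PRECONDITION & SPEC =====
def Spec_text_to_base64 (text : String) (out : String) : Prop := out = text_to_base64_alt text
instance (text : String) (out : String) : Decidable (Spec_text_to_base64 text out) := by unfold Spec_text_to_base64; infer_instance

-- ===== CLAIM (what is proved, stated in full; the proofs are below) =====
def Claim_equal_text_to_base64 : Prop := ∀ (text : String), Dom_text_to_base64 text → Spec_text_to_base64 text (text_to_base64 text)

-- ===== LEMMAS AND PROOFS =====

theorem and63 (n : Nat) : n &&& 63 = n % 64 := by
  have := Nat.and_two_pow_sub_one_eq_mod n 6
  norm_num at this
  exact this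

theorem foldA (value : Nat) (acc : List Char) :
    aEmit4 value acc
    = acc ++ [b64chars.getD (value / 262144 % 64) 'A', b64chars.getD (value / 4096 % 64) 'A',
              b64chars.getD (value / 64 % 64) 'A', b64chars.getD (value % 64) 'A'] := by
  simp [aEmit4, show List.range 4 = [0,1,2,3] from rfl, List.foldl, and63, Nat.shiftRight_eq_div_pow]

theorem bDrain8 (acc : Nat) :
    bDrain acc 8 = ([b64chars.getD (acc / 4) 'A'], acc % 4, 2) := by
  rw [bDrain]; norm_num [Nat.shiftLeft_eq]; rw [bDrain]; norm_num

theorem bDrain10 (acc : Nat) :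
    bDrain acc 10 = ([b64chars.getD (acc / 16) 'A'], acc % 16, 4) := by
  rw [bDrain]; norm_num [Nat.shiftLeft_eq]; rw [bDrain]; norm_num

theorem bDrain12 (acc : Nat) :
    bDrain acc 12 = ([b64chars.getD (acc / 64) 'A', b64chars.getD (acc % 64) 'A'], 0, 0) := by
  rw [bDrain]; norm_num [Nat.shiftLeft_eq]; rw [bDrain]; norm_num [Nat.shiftLeft_eq]
  rw [bDrain]; norm_num [Nat.mod_one]

theorem cEq (i j : Nat) (h : i = j) : b64chars[i]?.getD 'A' = b64chars[j]?.getD 'A' := by rw [h]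

theorem loop_eq_aux (n : Nat) : ∀ (bs : List Nat), bs.length ≤ n → ∀ (acc : List Char),
    (∀ b ∈ bs, b < 256) → aLoop bs acc = acc ++ bLoop bs 0 0 := by
  induction n with
  | zero =>
    intro bs hl acc _
    have : bs = [] := by simpa using List.length_eq_zero_iff.mp (Nat.le_zero.mp hl)
    subst this; simp [aLoop, bLoop]
  | succ n ih =>
    intro bs hl acc h
    match bs with
    | [] => simp [aLoop, bLoop]
    | [b0] =>
      have hb0 : b0 < 256 := h b0 (by simp)
      simp only [aLoop, foldA]
      norm_num
      simp only [aLoop, bLoop]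
      simp [List.take_append, List.take_of_length_le, Nat.shiftLeft_eq, bDrain8]
      repeat' apply And.intro
      all_goals exact cEq _ _ (by omega)
    | [b0, b1] =>
      have hb0 : b0 < 256 := h b0 (by simp)
      have hb1 : b1 < 256 := h b1 (by simp)
      simp only [aLoop, foldA]
      norm_num
      simp only [aLoop, bLoop]
      simp [List.take_append, List.take_of_length_le, Nat.shiftLeft_eq, bDrain8, bDrain10]
      repeat' apply And.intro
      all_goals exact cEq _ _ (by omega)
    | b0 :: b1 :: b2 :: rest =>
      have hb0 : b0 < 256 := h b0 (by simp)
      have hb1 : b1 < 256 := h b1 (by simp)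
      have hb2 : b2 < 256 := h b2 (by simp)
      have hrest : ∀ b ∈ rest, b < 256 := fun b hb => h b (by simp [hb])
      have hlen : rest.length ≤ n := by simp at hl; omega
      simp only [aLoop, foldA]
      norm_num
      rw [ih _ hlen _ hrest]
      simp only [bLoop]
      simp [Nat.shiftLeft_eq, bDrain8, bDrain10, bDrain12]
      repeat' apply And.intro
      all_goals exact cEq _ _ (by omega)

-- ===== VERDICT (by name: the statement is the Claim_ definition above) =====
theorem text_to_base64_spec : Claim_equal_text_to_base64 := by
  intro text hdom
  unfold Spec_text_to_base64 text_to_base64 text_to_base64_alt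
  have hb : ∀ b ∈ text.toList.map Char.toNat, b < 256 := by
    intro b hbm
    simp only [List.mem_map] at hbm
    obtain ⟨c, hc, rfl⟩ := hbm
    have hall := hdom
    unfold Dom_text_to_base64 pvDomStr at hall
    rw [List.all_eq_true] at hall
    have := hall c hc
    unfold pvDomChar at this
    simp at this
    omega
  rw [loop_eq_aux (text.toList.map Char.toNat).length _ le_rfl [] hb]
  simp
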